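-- pv_equiv track=rewrite | github.com/Dewep/GoogleCodeJam2016 | Round1C/C-Fashion-Police/main.py | solve
-- ===== SOURCE A (Python) =====
-- import itertools
--
-- digits = "0123456789"
--
-- def solve(J, P, S, K):
--     jp = {}
--     js = {}
--     ps = {}
--     jps = {}
--     for j in range(J):
--         for p in range(P):
--             jp[str(j) + str(p)] = 0
--             for s in range(S):
--                 jps[str(j) + str(p) + str(s)] = False
--         for s in range(S):
--             js[str(j) + str(s)] = 0
--     for p in range(P):
--         for s in range(S):
--             ps[str(p) + str(s)] = 0
--
--     res = []
--     added = True
--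
--     while added:
--         added = False
--         for j, p, s in itertools.product(digits[:J], digits[:P], digits[:S]):
--             if jp[j + p] < K and  js[j + s] < K and ps[p + s] < K and not jps[j + p + s]:
--                 jp[j + p] += 1
--                 js[j + s] += 1
--                 ps[p + s] += 1
--                 jps[j + p + s] = True
--                 added = True
--                 res.append([str(int(n) + 1) for n in [j, p, s]])
--
--     return res
-- ===== SOURCE B (Python) =====
-- def solve(J, P, S, K):
--     # One pass over the usable 10x10x10 label prefix (only outfits with a
--     # single-digit label can ever be scheduled); pairwise counters kept in
--     # tuple-keyed dicts, the jacket-pants counter is a local with early break.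
--     js = {}
--     ps = {}
--     res = []
--     for j in range(min(J, 10)):
--         for p in range(min(P, 10)):
--             c = 0
--             for s in range(min(S, 10)):
--                 if c >= K:
--                     break
--                 if js.get((j, s), 0) < K and ps.get((p, s), 0) < K:
--                     c += 1
--                     js[(j, s)] = js.get((j, s), 0) + 1
--                     ps[(p, s)] = ps.get((p, s), 0) + 1
--                     res.append([str(j + 1), str(p + 1), str(s + 1)])
--     return res
-- ===== Notes on version B (the rewrite author's own statement) =====
-- stated objective: faster
-- what changed: B drops A's while-added fixpoint loop (a single pass provably saturates the pairwise counters) and A's counter-dict initialisation over the full ranges, doing one pass over the usable 10x10x10 single-digit-label prefix with tuple-keyed counter dicts, a local jacket-pants counter and an early break.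
-- crash fix: When all three digit slices are non-empty but J < 0, P < 0, or S < 0 with K >= 1, Python A raises KeyError on a lookup in a dict whose keys were initialised over an empty range; B just iterates empty ranges and returns []. — e.g. on solve(-1, 1, 1, 1): A raises KeyError, B returns []
import Mathlib
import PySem

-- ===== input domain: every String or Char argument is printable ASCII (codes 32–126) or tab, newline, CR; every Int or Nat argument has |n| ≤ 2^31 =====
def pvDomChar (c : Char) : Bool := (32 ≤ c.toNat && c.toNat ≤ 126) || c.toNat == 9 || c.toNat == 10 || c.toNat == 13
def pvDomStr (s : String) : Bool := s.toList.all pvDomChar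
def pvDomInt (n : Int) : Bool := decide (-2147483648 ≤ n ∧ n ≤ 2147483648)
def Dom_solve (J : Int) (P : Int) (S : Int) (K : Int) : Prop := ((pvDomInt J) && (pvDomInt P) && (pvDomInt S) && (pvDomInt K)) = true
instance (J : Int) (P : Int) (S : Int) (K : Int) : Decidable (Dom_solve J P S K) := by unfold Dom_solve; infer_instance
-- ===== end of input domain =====

-- B replaces A's while-True fixpoint (plus counter dicts initialised over the FULL ranges) by a single pass
-- over the usable 10×10×10 single-digit-label prefix with tuple-keyed counters and an early break: faster
-- at scale because A's initialisation is Θ(J·P·S) while B's whole run is bounded by a constant.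

-- ===== PORT A =====
-- Python strings are modelled as their code-point lists (PySem.Chars style); A's four dicts are modelled as
-- hash maps keyed by those lists — A only ever reads them through lookups, so the dict's insertion order is
-- irrelevant to its result, and a hash map lets the port evaluate on the large admitted inputs.
def pvDigits : List Char := ['0', '1', '2', '3', '4', '5', '6', '7', '8', '9']  -- digits = "0123456789"

structure ASt where
  jp : Std.HashMap (List Char) Int
  js : Std.HashMap (List Char) Int
  ps : Std.HashMap (List Char) Int
  jps : Std.HashMap (List Char) Bool
  res : List (List String)
  added : Bool

-- the four init loops: jp/jps/js inside the j-loop, ps in its own p-loop (exactly A's order)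
def solveInitA (J : Int) (P : Int) (S : Int) : ASt :=
  let st0 : ASt := ⟨∅, ∅, ∅, ∅, [], true⟩
  let st1 := (PySem.List.pyRange 0 J 1).foldl (fun st j =>
    let st := (PySem.List.pyRange 0 P 1).foldl (fun st p =>
      let st := { st with jp := st.jp.insert (PySem.Int.toChars j ++ PySem.Int.toChars p) 0 }
      (PySem.List.pyRange 0 S 1).foldl (fun st s =>
        { st with jps := st.jps.insert (PySem.Int.toChars j ++ PySem.Int.toChars p ++ PySem.Int.toChars s) false }) st) st
    (PySem.List.pyRange 0 S 1).foldl (fun st s =>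
      { st with js := st.js.insert (PySem.Int.toChars j ++ PySem.Int.toChars s) 0 }) st) st0
  (PySem.List.pyRange 0 P 1).foldl (fun st p =>
    (PySem.List.pyRange 0 S 1).foldl (fun st s =>
      { st with ps := st.ps.insert (PySem.Int.toChars p ++ PySem.Int.toChars s) 0 }) st) st1

-- itertools.product(digits[:J], digits[:P], digits[:S]) in lexicographic order
def triplesA (J : Int) (P : Int) (S : Int) : List (Char × Char × Char) :=
  (PySem.List.slice pvDigits none (some J)).flatMap (fun j =>
    (PySem.List.slice pvDigits none (some P)).flatMap (fun p =>
      (PySem.List.slice pvDigits none (some S)).map (fun s => (j, p, s))))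

-- the body of the inner for-loop; Python's jp[j+p] etc. are plain lookups that never miss inside
-- Pre_solve (every looked-up key was initialised), so getD is exact there
def stepA (K : Int) (st : ASt) (t : Char × Char × Char) : ASt :=
  let (j, p, s) := t
  if st.jp.getD [j, p] 0 < K ∧ st.js.getD [j, s] 0 < K ∧ st.ps.getD [p, s] 0 < K
      ∧ st.jps.getD [j, p, s] false = false then
    { jp := st.jp.insert [j, p] (st.jp.getD [j, p] 0 + 1)
      js := st.js.insert [j, s] (st.js.getD [j, s] 0 + 1)
      ps := st.ps.insert [p, s] (st.ps.getD [p, s] 0 + 1)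
      jps := st.jps.insert [j, p, s] true
      res := st.res ++ [[PySem.Int.toStr ((PySem.Int.ofChars? [j]).getD 0 + 1),
                         PySem.Int.toStr ((PySem.Int.ofChars? [p]).getD 0 + 1),
                         PySem.Int.toStr ((PySem.Int.ofChars? [s]).getD 0 + 1)]]
      added := true }
  else st

def passA (K : Int) (T : List (Char × Char × Char)) (st : ASt) : ASt :=
  T.foldl (stepA K) st

-- the while-added loop; the fuel only makes the recursion total: a continuing iteration marks at least one
-- new triple, so |T| + 2 passes can never be exhausted (the proof shows the loop stops after two passes)
def loopA (K : Int) (T : List (Char × Char × Char)) : Nat → ASt → ASt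
  | 0, st => st
  | n + 1, st =>
    if st.added then loopA K T n (passA K T { st with added := false }) else st

def solve (J : Int) (P : Int) (S : Int) (K : Int) : List (List String) :=
  (loopA K (triplesA J P S) (J.toNat * P.toNat * S.toNat + 2) (solveInitA J P S)).res

-- ===== PORT B =====
structure BSt where
  js : PySem.Dict (Int × Int) Int
  ps : PySem.Dict (Int × Int) Int
  res : List (List String)

-- the inner for-s loop of Source B, with its early break once the local jacket-pants counter c reaches K
def innerB (K : Int) (j : Int) (p : Int) : List Int → Int → BSt → BSt
  | [], _, st => st
  | s :: rest, c, st =>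
    if c ≥ K then st
    else if st.js.getD (j, s) 0 < K ∧ st.ps.getD (p, s) 0 < K then
      innerB K j p rest (c + 1)
        ⟨st.js.insert (j, s) (st.js.getD (j, s) 0 + 1),
         st.ps.insert (p, s) (st.ps.getD (p, s) 0 + 1),
         st.res ++ [[PySem.Int.toStr (j + 1), PySem.Int.toStr (p + 1), PySem.Int.toStr (s + 1)]]⟩
    else innerB K j p rest c st

def solve_alt (J : Int) (P : Int) (S : Int) (K : Int) : List (List String) :=
  ((PySem.List.pyRange 0 (min J 10) 1).foldl (fun st j =>
    (PySem.List.pyRange 0 (min P 10) 1).foldl (fun st p =>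
      innerB K j p (PySem.List.pyRange 0 (min S 10) 1) 0 st) st)
    (⟨PySem.Dict.empty, PySem.Dict.empty, []⟩ : BSt)).res

-- ===== PRECONDITION & SPEC =====
-- digits[:x] (the slice of the ten digit characters) is non-empty
def pvNE (x : Int) : Prop := 1 ≤ x ∨ (-9 ≤ x ∧ x < 0)

-- Pre_ excludes exactly the inputs where Python A raises KeyError: the triple product is non-empty
-- (all three digit slices non-empty) but a looked-up dict key was never initialised — jp misses when
-- J < 0 or P < 0, and js misses when S < 0 with K ≥ 1 (with K < 1 the jp test short-circuits the lookup).
def Pre_solve (J : Int) (P : Int) (S : Int) (K : Int) : Prop :=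
  ¬ (pvNE J ∧ pvNE P ∧ pvNE S ∧ (J < 0 ∨ P < 0 ∨ (S < 0 ∧ 1 ≤ K)))
instance (J : Int) (P : Int) (S : Int) (K : Int) : Decidable (Pre_solve J P S K) := by
  unfold Pre_solve pvNE; infer_instance

def pvWitness_solve : Int × Int × Int × Int := (3, 3, 3, 2)

-- On the excluded region Python A raises KeyError (a lookup in a dict whose keys were initialised over an
-- empty range) while B simply iterates over empty ranges and returns [].
def Raises_solve (J : Int) (P : Int) (S : Int) (K : Int) : Prop :=
  pvNE J ∧ pvNE P ∧ pvNE S ∧ (J < 0 ∨ P < 0 ∨ (S < 0 ∧ 1 ≤ K))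
instance (J : Int) (P : Int) (S : Int) (K : Int) : Decidable (Raises_solve J P S K) := by
  unfold Raises_solve pvNE; infer_instance
def pvRaiseWitness_solve : Int × Int × Int × Int := (-1, 1, 1, 1)
def pvRaiseWitnessOut_solve : List (List String) := []

def Spec_solve (J : Int) (P : Int) (S : Int) (K : Int) (out : List (List String)) : Prop := out = solve_alt J P S K
instance (J : Int) (P : Int) (S : Int) (K : Int) (out : List (List String)) : Decidable (Spec_solve J P S K out) := by unfold Spec_solve; infer_instance

-- ===== CLAIM (what is proved, stated in full; the proofs are below) =====
def Claim_equal_solve : Prop := ∀ (J : Int) (P : Int) (S : Int) (K : Int), Dom_solve J P S K → Pre_solve J P S K → Spec_solve J P S K (solve J P S K)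

def Claim_raises_solve : Prop := (∀ (J : Int) (P : Int) (S : Int) (K : Int), Dom_solve J P S K → Raises_solve J P S K → ¬ Pre_solve J P S K) ∧ (Dom_solve (pvRaiseWitness_solve.1) (pvRaiseWitness_solve.2.1) (pvRaiseWitness_solve.2.2.1) (pvRaiseWitness_solve.2.2.2) ∧ Raises_solve (pvRaiseWitness_solve.1) (pvRaiseWitness_solve.2.1) (pvRaiseWitness_solve.2.2.1) (pvRaiseWitness_solve.2.2.2) ∧ solve_alt (pvRaiseWitness_solve.1) (pvRaiseWitness_solve.2.1) (pvRaiseWitness_solve.2.2.1) (pvRaiseWitness_solve.2.2.2) = pvRaiseWitnessOut_solve)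


-- ===== LEMMAS AND PROOFS =====

-- digit characters
def dchar (a : Int) : Char := Char.ofNat (48 + a.toNat)

def dg (a : Int) : Prop := 0 ≤ a ∧ a ≤ 9

theorem dchar_inj {a b : Int} (ha : dg a) (hb : dg b) (h : dchar a = dchar b) : a = b := by
  obtain ⟨ha0, ha9⟩ := ha; obtain ⟨hb0, hb9⟩ := hb
  revert h; interval_cases a <;> interval_cases b <;> decide

theorem ofChars_dchar {a : Int} (ha : dg a) : PySem.Int.ofChars? [dchar a] = some a := by
  obtain ⟨ha0, ha9⟩ := ha; interval_cases a <;> decide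

-- the digit slices
def csOf (x : Int) : List Char := PySem.List.slice pvDigits none (some x)

theorem csOf_eq {x : Int} (h : 1 ≤ x) :
    csOf x = (PySem.List.pyRange 0 (min x 10) 1).map dchar := by
  by_cases h10 : x ≤ 10
  · interval_cases x <;> decide
  · have hm : min x 10 = 10 := by omega
    have hx0 : (0:Int) ≤ x := by omega
    rw [hm, csOf, PySem.List.slice_to pvDigits hx0,
      List.take_of_length_le (by have h10' : (10:Nat) ≤ x.toNat := by omega
                                 simpa [pvDigits] using h10')]
    decide

theorem csOf_nil {x : Int} (h : ¬ pvNE x) : csOf x = [] := by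
  unfold pvNE at h
  rcases lt_trichotomy x 0 with hx | hx | hx
  · have hx10 : x ≤ -10 := by omega
    have hlen10 : pvDigits.length = 10 := by decide
    have hlen : (csOf x).length = 0 := by
      rw [csOf, ← PySem.List.slice_zero_start, PySem.List.length_slice, hlen10]
      have h1 : PySem.List.clampIdx 10 x = 0 := by
        simp only [PySem.List.clampIdx]; split_ifs <;> omega
      have h2 : PySem.List.clampIdx 10 0 = 0 := by decide
      rw [h1, h2]
    exact List.eq_nil_of_length_eq_zero hlen
  · subst hx; decide
  · exfalso; exact h (Or.inl (by omega))

theorem pyRange_nil {m : Int} (h : m ≤ 0) : PySem.List.pyRange 0 m 1 = [] :=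
  PySem.List.pyRange_one_eq_nil (by omega)

-- the loop condition of A's inner if, as a Prop
def okA (K : Int) (st : ASt) (t : Char × Char × Char) : Prop :=
  st.jp.getD [t.1, t.2.1] 0 < K ∧ st.js.getD [t.1, t.2.2] 0 < K ∧
  st.ps.getD [t.2.1, t.2.2] 0 < K ∧ st.jps.getD [t.1, t.2.1, t.2.2] false = false

theorem stepA_of_ok {K : Int} {st : ASt} {t : Char × Char × Char} (h : okA K st t) :
    stepA K st t =
      { jp := st.jp.insert [t.1, t.2.1] (st.jp.getD [t.1, t.2.1] 0 + 1)
        js := st.js.insert [t.1, t.2.2] (st.js.getD [t.1, t.2.2] 0 + 1)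
        ps := st.ps.insert [t.2.1, t.2.2] (st.ps.getD [t.2.1, t.2.2] 0 + 1)
        jps := st.jps.insert [t.1, t.2.1, t.2.2] true
        res := st.res ++ [[PySem.Int.toStr ((PySem.Int.ofChars? [t.1]).getD 0 + 1),
                           PySem.Int.toStr ((PySem.Int.ofChars? [t.2.1]).getD 0 + 1),
                           PySem.Int.toStr ((PySem.Int.ofChars? [t.2.2]).getD 0 + 1)]]
        added := true } := by
  obtain ⟨j, p, s⟩ := t
  simp only [okA] at h
  simp only [stepA, if_pos h]

theorem stepA_of_ok' {K : Int} {st : ASt} {cj cp cs : Char} (h : okA K st (cj, cp, cs)) :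
    stepA K st (cj, cp, cs) =
      { jp := st.jp.insert [cj, cp] (st.jp.getD [cj, cp] 0 + 1)
        js := st.js.insert [cj, cs] (st.js.getD [cj, cs] 0 + 1)
        ps := st.ps.insert [cp, cs] (st.ps.getD [cp, cs] 0 + 1)
        jps := st.jps.insert [cj, cp, cs] true
        res := st.res ++ [[PySem.Int.toStr ((PySem.Int.ofChars? [cj]).getD 0 + 1),
                           PySem.Int.toStr ((PySem.Int.ofChars? [cp]).getD 0 + 1),
                           PySem.Int.toStr ((PySem.Int.ofChars? [cs]).getD 0 + 1)]]
        added := true } := stepA_of_ok h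

theorem stepA_of_not {K : Int} {st : ASt} {t : Char × Char × Char} (h : ¬ okA K st t) :
    stepA K st t = st := by
  obtain ⟨j, p, s⟩ := t
  simp only [okA] at h
  simp only [stepA, if_neg h]

-- counters only grow, markers only get set
def leA (a b : ASt) : Prop :=
  (∀ k, a.jp.getD k 0 ≤ b.jp.getD k 0) ∧ (∀ k, a.js.getD k 0 ≤ b.js.getD k 0) ∧
  (∀ k, a.ps.getD k 0 ≤ b.ps.getD k 0) ∧
  (∀ k, a.jps.getD k false = true → b.jps.getD k false = true)

theorem leA_rfl {a : ASt} : leA a a :=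
  ⟨fun _ => le_refl _, fun _ => le_refl _, fun _ => le_refl _, fun _ h => h⟩

theorem leA_trans {a b c : ASt} (h1 : leA a b) (h2 : leA b c) : leA a c :=
  ⟨fun k => le_trans (h1.1 k) (h2.1 k), fun k => le_trans (h1.2.1 k) (h2.2.1 k),
   fun k => le_trans (h1.2.2.1 k) (h2.2.2.1 k), fun k h => h2.2.2.2 k (h1.2.2.2 k h)⟩

theorem leA_step {K : Int} {st : ASt} {t : Char × Char × Char} : leA st (stepA K st t) := by
  by_cases h : okA K st t
  · rw [stepA_of_ok h]
    refine ⟨fun k => ?_, fun k => ?_, fun k => ?_, fun k hk => ?_⟩ <;>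
      simp only [Std.HashMap.getD_insert]
    all_goals try split
    · next heq => rw [← (beq_iff_eq.mp heq)]; omega
    · exact le_refl _
    · next heq => rw [← (beq_iff_eq.mp heq)]; omega
    · exact le_refl _
    · next heq => rw [← (beq_iff_eq.mp heq)]; omega
    · exact le_refl _
    · rfl
    · exact hk
  · rw [stepA_of_not h]; exact leA_rfl

theorem leA_foldl {K : Int} : ∀ (T : List (Char × Char × Char)) (st : ASt),
    leA st (T.foldl (stepA K) st) := by
  intro T
  induction T with
  | nil => intro st; exact leA_rfl
  | cons t T ih => intro st; exact leA_trans leA_step (ih (stepA K st t))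

theorem okA_anti {K : Int} {a b : ASt} {t : Char × Char × Char} (hle : leA a b)
    (h : okA K b t) : okA K a t := by
  obtain ⟨h1, h2, h3, h4⟩ := h
  refine ⟨lt_of_le_of_lt (hle.1 _) h1, lt_of_le_of_lt (hle.2.1 _) h2,
    lt_of_le_of_lt (hle.2.2.1 _) h3, ?_⟩
  by_contra hm
  have : a.jps.getD [t.1, t.2.1, t.2.2] false = true := by
    cases hv : a.jps.getD [t.1, t.2.1, t.2.2] false
    · exact absurd hv hm
    · rfl
  rw [hle.2.2.2 _ this] at h4
  exact absurd h4 (by decide)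

theorem pass_saturates {K : Int} : ∀ (T : List (Char × Char × Char)) (st : ASt),
    ∀ t ∈ T, ¬ okA K (T.foldl (stepA K) st) t := by
  intro T
  induction T with
  | nil => intro st t ht; simp at ht
  | cons t0 T ih =>
    intro st t ht
    rw [List.foldl_cons]
    rcases List.mem_cons.mp ht with rfl | htT
    · by_cases h0 : okA K st t
      · have hm : (stepA K st t).jps.getD [t.1, t.2.1, t.2.2] false = true := by
          rw [stepA_of_ok h0]; exact Std.HashMap.getD_insert_self
        intro hok
        have hfin := (leA_foldl (K := K) T (stepA K st t)).2.2.2 _ hm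
        rw [hok.2.2.2] at hfin
        exact absurd hfin (by decide)
      · intro hok
        exact h0 (okA_anti (leA_trans leA_step (leA_foldl T _)) hok)
    · exact ih (stepA K st t0) t htT

theorem pass_noop {K : Int} : ∀ (T : List (Char × Char × Char)) (st : ASt),
    (∀ t ∈ T, ¬ okA K st t) → T.foldl (stepA K) st = st := by
  intro T
  induction T with
  | nil => intro st _; rfl
  | cons t0 T ih =>
    intro st h
    rw [List.foldl_cons, stepA_of_not (h t0 (List.mem_cons_self))]
    exact ih st (fun t ht => h t (List.mem_cons_of_mem _ ht))

theorem loop_res {K : Int} {T : List (Char × Char × Char)} : ∀ (n : Nat) (st : ASt),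
    (∀ t ∈ T, ¬ okA K st t) → (loopA K T n st).res = st.res := by
  intro n
  induction n with
  | zero => intro st _; rfl
  | succ n ih =>
    intro st hsat
    by_cases hadd : st.added
    · have hsat' : ∀ t ∈ T, ¬ okA K ({ st with added := false } : ASt) t := hsat
      rw [loopA, if_pos hadd]
      rw [show passA K T { st with added := false } = { st with added := false } from
        pass_noop T _ hsat']
      rw [ih _ hsat']
    · rw [loopA, if_neg hadd]

-- invariant of the initialisation: every counter reads 0, every marker reads false
def invZ (st : ASt) : Prop :=
  (∀ k, st.jp.getD k 0 = 0) ∧ (∀ k, st.js.getD k 0 = 0) ∧ (∀ k, st.ps.getD k 0 = 0) ∧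
  (∀ k, st.jps.getD k false = false) ∧ st.res = [] ∧ st.added = true

theorem foldl_inv {α σ : Type} (Inv : σ → Prop) (f : σ → α → σ)
    (h : ∀ s x, Inv s → Inv (f s x)) : ∀ (l : List α) (s : σ), Inv s → Inv (l.foldl f s) := by
  intro l
  induction l with
  | nil => intro s hs; exact hs
  | cons x l ih => intro s hs; exact ih (f s x) (h s x hs)

theorem getD_insert_zero {m : Std.HashMap (List Char) Int} {k key : List Char}
    (h : ∀ k', m.getD k' 0 = 0) : (m.insert key 0).getD k 0 = 0 := by
  rw [Std.HashMap.getD_insert]; split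
  · rfl
  · exact h k

theorem getD_insert_false {m : Std.HashMap (List Char) Bool} {k key : List Char}
    (h : ∀ k', m.getD k' false = false) : (m.insert key false).getD k false = false := by
  rw [Std.HashMap.getD_insert]; split
  · rfl
  · exact h k

theorem invZ_jp {st : ASt} {key : List Char} (h : invZ st) :
    invZ { st with jp := st.jp.insert key 0 } :=
  ⟨fun _ => getD_insert_zero h.1, h.2⟩
theorem invZ_js {st : ASt} {key : List Char} (h : invZ st) :
    invZ { st with js := st.js.insert key 0 } :=
  ⟨h.1, fun _ => getD_insert_zero h.2.1, h.2.2⟩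
theorem invZ_ps {st : ASt} {key : List Char} (h : invZ st) :
    invZ { st with ps := st.ps.insert key 0 } :=
  ⟨h.1, h.2.1, fun _ => getD_insert_zero h.2.2.1, h.2.2.2⟩
theorem invZ_jps {st : ASt} {key : List Char} (h : invZ st) :
    invZ { st with jps := st.jps.insert key false } :=
  ⟨h.1, h.2.1, h.2.2.1, fun _ => getD_insert_false h.2.2.2.1, h.2.2.2.2⟩

theorem init_invZ (J P S : Int) : invZ (solveInitA J P S) := by
  unfold solveInitA
  apply foldl_inv invZ
  · intro st p hst
    apply foldl_inv invZ
    · intro st s hst; exact invZ_ps hst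
    · exact hst
  · apply foldl_inv invZ
    · intro st j hst
      apply foldl_inv invZ
      · intro st s hst; exact invZ_js hst
      · apply foldl_inv invZ
        · intro st p hst
          apply foldl_inv invZ
          · intro st s hst; exact invZ_jps hst
          · exact invZ_jp hst
        · exact hst
    · exact ⟨fun k => Std.HashMap.getD_empty, fun k => Std.HashMap.getD_empty,
        fun k => Std.HashMap.getD_empty, fun k => Std.HashMap.getD_empty, rfl, rfl⟩

theorem inner_noopA {K j p : Int} : ∀ (ss : List Int) (σ : ASt),
    K ≤ σ.jp.getD [dchar j, dchar p] 0 →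
    ss.foldl (fun σ s => stepA K σ (dchar j, dchar p, dchar s)) σ = σ := by
  intro ss
  induction ss with
  | nil => intro σ _; rfl
  | cons s rest ih =>
    intro σ hK
    have hnok : ¬ okA K σ (dchar j, dchar p, dchar s) := fun h => absurd h.1 (not_lt.mpr hK)
    rw [List.foldl_cons, stepA_of_not hnok]
    exact ih σ hK

theorem innerB_stop {K j p c : Int} (h : c ≥ K) :
    ∀ (l : List Int) (τ : BSt), innerB K j p l c τ = τ
  | [], _ => rfl
  | s :: rest, τ => by rw [innerB, if_pos h]

theorem inner_sim (K : Int) {j p : Int} (hj : dg j) (hp : dg p) :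
    ∀ (ss : List Int), (∀ x ∈ ss, dg x) → ss.Pairwise (· < ·) →
    ∀ (σ : ASt) (τ : BSt) (c : Int),
    σ.jp.getD [dchar j, dchar p] 0 = c →
    (∀ a b, dg a → dg b → σ.js.getD [dchar a, dchar b] 0 = τ.js.getD (a, b) 0) →
    (∀ a b, dg a → dg b → σ.ps.getD [dchar a, dchar b] 0 = τ.ps.getD (a, b) 0) →
    (∀ x ∈ ss, σ.jps.getD [dchar j, dchar p, dchar x] false = false) →
    σ.res = τ.res →
    (∀ a b, dg a → dg b → (ss.foldl (fun σ s => stepA K σ (dchar j, dchar p, dchar s)) σ).js.getD [dchar a, dchar b] 0 = (innerB K j p ss c τ).js.getD (a, b) 0) ∧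
    (∀ a b, dg a → dg b → (ss.foldl (fun σ s => stepA K σ (dchar j, dchar p, dchar s)) σ).ps.getD [dchar a, dchar b] 0 = (innerB K j p ss c τ).ps.getD (a, b) 0) ∧
    (ss.foldl (fun σ s => stepA K σ (dchar j, dchar p, dchar s)) σ).res = (innerB K j p ss c τ).res ∧
    (∀ k, k ≠ [dchar j, dchar p] → (ss.foldl (fun σ s => stepA K σ (dchar j, dchar p, dchar s)) σ).jp.getD k 0 = σ.jp.getD k 0) ∧
    (∀ k, (∀ x ∈ ss, k ≠ [dchar j, dchar p, dchar x]) → (ss.foldl (fun σ s => stepA K σ (dchar j, dchar p, dchar s)) σ).jps.getD k false = σ.jps.getD k false) := by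
  intro ss
  induction ss with
  | nil =>
    intro _ _ σ τ c _ Hjs Hps _ Hres
    exact ⟨Hjs, Hps, Hres, fun _ _ => rfl, fun _ _ => rfl⟩
  | cons s rest ih =>
    intro hdg hsort σ τ c Hjp Hjs Hps Hm Hres
    have hds : dg s := hdg s List.mem_cons_self
    have hdgr : ∀ x ∈ rest, dg x := fun x hx => hdg x (List.mem_cons_of_mem _ hx)
    have hsr : rest.Pairwise (· < ·) := hsort.of_cons
    have hlt : ∀ x ∈ rest, s < x := (List.pairwise_cons.mp hsort).1
    rw [List.foldl_cons]
    by_cases hc : c ≥ K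
    · have hstop : stepA K σ (dchar j, dchar p, dchar s) = σ :=
        stepA_of_not (fun h => absurd h.1 (not_lt.mpr (by rw [Hjp]; omega)))
      rw [hstop, inner_noopA rest σ (by rw [Hjp]; omega), innerB_stop hc]
      exact ⟨Hjs, Hps, Hres, fun _ _ => rfl,
        fun k hk => rfl⟩
    · have hcK : c < K := by omega
      by_cases hcond : σ.js.getD [dchar j, dchar s] 0 < K ∧ σ.ps.getD [dchar p, dchar s] 0 < K
      · have hok : okA K σ (dchar j, dchar p, dchar s) :=
          ⟨by rw [Hjp]; exact hcK, hcond.1, hcond.2, Hm s List.mem_cons_self⟩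
        have hbc : τ.js.getD (j, s) 0 < K ∧ τ.ps.getD (p, s) 0 < K := by
          rw [← Hjs j s hj hds, ← Hps p s hp hds]; exact hcond
        rw [stepA_of_ok' hok, innerB, if_neg hc, if_pos hbc]
        have H1 : ({ jp := σ.jp.insert [dchar j, dchar p] (σ.jp.getD [dchar j, dchar p] 0 + 1), js := σ.js.insert [dchar j, dchar s] (σ.js.getD [dchar j, dchar s] 0 + 1), ps := σ.ps.insert [dchar p, dchar s] (σ.ps.getD [dchar p, dchar s] 0 + 1), jps := σ.jps.insert [dchar j, dchar p, dchar s] true, res := σ.res ++ [[PySem.Int.toStr ((PySem.Int.ofChars? [dchar j]).getD 0 + 1), PySem.Int.toStr ((PySem.Int.ofChars? [dchar p]).getD 0 + 1), PySem.Int.toStr ((PySem.Int.ofChars? [dchar s]).getD 0 + 1)]], added := true } : ASt).jp.getD [dchar j, dchar p] 0 = c + 1 := by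
          simp only [Std.HashMap.getD_insert_self]; rw [Hjp]
        have H2 : ∀ a b, dg a → dg b → ({ jp := σ.jp.insert [dchar j, dchar p] (σ.jp.getD [dchar j, dchar p] 0 + 1), js := σ.js.insert [dchar j, dchar s] (σ.js.getD [dchar j, dchar s] 0 + 1), ps := σ.ps.insert [dchar p, dchar s] (σ.ps.getD [dchar p, dchar s] 0 + 1), jps := σ.jps.insert [dchar j, dchar p, dchar s] true, res := σ.res ++ [[PySem.Int.toStr ((PySem.Int.ofChars? [dchar j]).getD 0 + 1), PySem.Int.toStr ((PySem.Int.ofChars? [dchar p]).getD 0 + 1), PySem.Int.toStr ((PySem.Int.ofChars? [dchar s]).getD 0 + 1)]], added := true } : ASt).js.getD [dchar a, dchar b] 0 = ((⟨τ.js.insert (j, s) (τ.js.getD (j, s) 0 + 1), τ.ps.insert (p, s) (τ.ps.getD (p, s) 0 + 1), τ.res ++ [[PySem.Int.toStr (j + 1), PySem.Int.toStr (p + 1), PySem.Int.toStr (s + 1)]]⟩ : BSt)).js.getD (a, b) 0 := by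
          intro a b hda hdb
          by_cases hab : a = j ∧ b = s
          · obtain ⟨rfl, rfl⟩ := hab
            simp only [Std.HashMap.getD_insert_self, PySem.Dict.getD_insert_self]
            rw [Hjs a b hda hdb]
          · have hkA : [dchar a, dchar b] ≠ [dchar j, dchar s] := by
              intro h
              simp only [List.cons.injEq, and_true] at h
              exact hab ⟨dchar_inj hda hj h.1, dchar_inj hdb hds h.2⟩
            have hkB : (a, b) ≠ (j, s) := by
              intro h
              rw [Prod.mk.injEq] at h
              exact hab h
            simp only
            rw [Std.HashMap.getD_insert, if_neg (by simp only [beq_iff_eq]; exact fun h => hkA h.symm),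
              PySem.Dict.getD_insert_of_ne _ _ _ hkB]
            exact Hjs a b hda hdb
        have H3 : ∀ a b, dg a → dg b → ({ jp := σ.jp.insert [dchar j, dchar p] (σ.jp.getD [dchar j, dchar p] 0 + 1), js := σ.js.insert [dchar j, dchar s] (σ.js.getD [dchar j, dchar s] 0 + 1), ps := σ.ps.insert [dchar p, dchar s] (σ.ps.getD [dchar p, dchar s] 0 + 1), jps := σ.jps.insert [dchar j, dchar p, dchar s] true, res := σ.res ++ [[PySem.Int.toStr ((PySem.Int.ofChars? [dchar j]).getD 0 + 1), PySem.Int.toStr ((PySem.Int.ofChars? [dchar p]).getD 0 + 1), PySem.Int.toStr ((PySem.Int.ofChars? [dchar s]).getD 0 + 1)]], added := true } : ASt).ps.getD [dchar a, dchar b] 0 = ((⟨τ.js.insert (j, s) (τ.js.getD (j, s) 0 + 1), τ.ps.insert (p, s) (τ.ps.getD (p, s) 0 + 1), τ.res ++ [[PySem.Int.toStr (j + 1), PySem.Int.toStr (p + 1), PySem.Int.toStr (s + 1)]]⟩ : BSt)).ps.getD (a, b) 0 := by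
          intro a b hda hdb
          by_cases hab : a = p ∧ b = s
          · obtain ⟨rfl, rfl⟩ := hab
            simp only [Std.HashMap.getD_insert_self, PySem.Dict.getD_insert_self]
            rw [Hps a b hda hdb]
          · have hkA : [dchar a, dchar b] ≠ [dchar p, dchar s] := by
              intro h
              simp only [List.cons.injEq, and_true] at h
              exact hab ⟨dchar_inj hda hp h.1, dchar_inj hdb hds h.2⟩
            have hkB : (a, b) ≠ (p, s) := by
              intro h
              rw [Prod.mk.injEq] at h
              exact hab h
            simp only
            rw [Std.HashMap.getD_insert, if_neg (by simp only [beq_iff_eq]; exact fun h => hkA h.symm),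
              PySem.Dict.getD_insert_of_ne _ _ _ hkB]
            exact Hps a b hda hdb
        have H4 : ∀ x ∈ rest, ({ jp := σ.jp.insert [dchar j, dchar p] (σ.jp.getD [dchar j, dchar p] 0 + 1), js := σ.js.insert [dchar j, dchar s] (σ.js.getD [dchar j, dchar s] 0 + 1), ps := σ.ps.insert [dchar p, dchar s] (σ.ps.getD [dchar p, dchar s] 0 + 1), jps := σ.jps.insert [dchar j, dchar p, dchar s] true, res := σ.res ++ [[PySem.Int.toStr ((PySem.Int.ofChars? [dchar j]).getD 0 + 1), PySem.Int.toStr ((PySem.Int.ofChars? [dchar p]).getD 0 + 1), PySem.Int.toStr ((PySem.Int.ofChars? [dchar s]).getD 0 + 1)]], added := true } : ASt).jps.getD [dchar j, dchar p, dchar x] false = false := by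
          intro x hx
          have hxs : dchar x ≠ dchar s := fun h => by
            have := dchar_inj (hdgr x hx) hds h
            have := hlt x hx
            omega
          simp only
          rw [Std.HashMap.getD_insert, if_neg (by
            simp only [beq_iff_eq, List.cons.injEq, and_true, true_and]

            exact fun h => hxs h.symm)]
          exact Hm x (List.mem_cons_of_mem _ hx)
        have H5 : ({ jp := σ.jp.insert [dchar j, dchar p] (σ.jp.getD [dchar j, dchar p] 0 + 1), js := σ.js.insert [dchar j, dchar s] (σ.js.getD [dchar j, dchar s] 0 + 1), ps := σ.ps.insert [dchar p, dchar s] (σ.ps.getD [dchar p, dchar s] 0 + 1), jps := σ.jps.insert [dchar j, dchar p, dchar s] true, res := σ.res ++ [[PySem.Int.toStr ((PySem.Int.ofChars? [dchar j]).getD 0 + 1), PySem.Int.toStr ((PySem.Int.ofChars? [dchar p]).getD 0 + 1), PySem.Int.toStr ((PySem.Int.ofChars? [dchar s]).getD 0 + 1)]], added := true } : ASt).res = ((⟨τ.js.insert (j, s) (τ.js.getD (j, s) 0 + 1), τ.ps.insert (p, s) (τ.ps.getD (p, s) 0 + 1), τ.res ++ [[PySem.Int.toStr (j + 1), PySem.Int.toStr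 (p + 1), PySem.Int.toStr (s + 1)]]⟩ : BSt)).res := by
          simp only
          rw [Hres, ofChars_dchar hj, ofChars_dchar hp, ofChars_dchar hds]
          rfl
        obtain ⟨ihjs, ihps, ihres, ihfjp, ihfjps⟩ :=
          ih hdgr hsr ({ jp := σ.jp.insert [dchar j, dchar p] (σ.jp.getD [dchar j, dchar p] 0 + 1), js := σ.js.insert [dchar j, dchar s] (σ.js.getD [dchar j, dchar s] 0 + 1), ps := σ.ps.insert [dchar p, dchar s] (σ.ps.getD [dchar p, dchar s] 0 + 1), jps := σ.jps.insert [dchar j, dchar p, dchar s] true, res := σ.res ++ [[PySem.Int.toStr ((PySem.Int.ofChars? [dchar j]).getD 0 + 1), PySem.Int.toStr ((PySem.Int.ofChars? [dchar p]).getD 0 + 1), PySem.Int.toStr ((PySem.Int.ofChars? [dchar s]).getD 0 + 1)]], added := true } : ASt) ((⟨τ.js.insert (j, s) (τ.js.getD (j, s) 0 + 1), τ.ps.insert (p, s) (τ.ps.getD (p, s) 0 + 1), τ.res ++ [[PySem.Int.toStr (j + 1), PySem.Int.toStr (p + 1), PySem.Int.toStr (s + 1)]]⟩ : BSt)) (c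 + 1) H1 H2 H3 H4 H5
        refine ⟨ihjs, ihps, ihres, ?_, ?_⟩
        · intro k hk
          rw [ihfjp k hk]
          simp only
          rw [Std.HashMap.getD_insert, if_neg (by simp only [beq_iff_eq]; exact fun h => hk h.symm)]
        · intro k hk
          rw [ihfjps k (fun x hx => hk x (List.mem_cons_of_mem _ hx))]
          simp only
          rw [Std.HashMap.getD_insert, if_neg (by simp only [beq_iff_eq]; exact fun h => (hk s List.mem_cons_self) h.symm)]
      · have hnok : ¬ okA K σ (dchar j, dchar p, dchar s) := fun h => hcond ⟨h.2.1, h.2.2.1⟩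
        have hbc : ¬ (τ.js.getD (j, s) 0 < K ∧ τ.ps.getD (p, s) 0 < K) := by
          rw [← Hjs j s hj hds, ← Hps p s hp hds]; exact hcond
        rw [stepA_of_not hnok, innerB, if_neg hc, if_neg hbc]
        obtain ⟨ihjs, ihps, ihres, ihfjp, ihfjps⟩ :=
          ih hdgr hsr σ τ c Hjp Hjs Hps (fun x hx => Hm x (List.mem_cons_of_mem _ hx)) Hres
        exact ⟨ihjs, ihps, ihres, ihfjp,
          fun k hk => ihfjps k (fun x hx => hk x (List.mem_cons_of_mem _ hx))⟩

theorem middle_sim (K : Int) {j : Int} (hj : dg j) (sR : List Int)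
    (hsR : ∀ x ∈ sR, dg x) (hsSort : sR.Pairwise (· < ·)) :
    ∀ (M : List Int), (∀ x ∈ M, dg x) → M.Pairwise (· < ·) →
    ∀ (σ : ASt) (τ : BSt),
    (∀ q ∈ M, σ.jp.getD [dchar j, dchar q] 0 = 0) →
    (∀ a b, dg a → dg b → σ.js.getD [dchar a, dchar b] 0 = τ.js.getD (a, b) 0) →
    (∀ a b, dg a → dg b → σ.ps.getD [dchar a, dchar b] 0 = τ.ps.getD (a, b) 0) →
    (∀ q ∈ M, ∀ x ∈ sR, σ.jps.getD [dchar j, dchar q, dchar x] false = false) →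
    σ.res = τ.res →
    (∀ a b, dg a → dg b → (M.foldl (fun σ q => sR.foldl (fun σ x => stepA K σ (dchar j, dchar q, dchar x)) σ) σ).js.getD [dchar a, dchar b] 0 = (M.foldl (fun τ q => innerB K j q sR 0 τ) τ).js.getD (a, b) 0) ∧
    (∀ a b, dg a → dg b → (M.foldl (fun σ q => sR.foldl (fun σ x => stepA K σ (dchar j, dchar q, dchar x)) σ) σ).ps.getD [dchar a, dchar b] 0 = (M.foldl (fun τ q => innerB K j q sR 0 τ) τ).ps.getD (a, b) 0) ∧
    (M.foldl (fun σ q => sR.foldl (fun σ x => stepA K σ (dchar j, dchar q, dchar x)) σ) σ).res = (M.foldl (fun τ q => innerB K j q sR 0 τ) τ).res ∧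
    (∀ k, (∀ q ∈ M, k ≠ [dchar j, dchar q]) → (M.foldl (fun σ q => sR.foldl (fun σ x => stepA K σ (dchar j, dchar q, dchar x)) σ) σ).jp.getD k 0 = σ.jp.getD k 0) ∧
    (∀ k, (∀ q ∈ M, ∀ x ∈ sR, k ≠ [dchar j, dchar q, dchar x]) →
      (M.foldl (fun σ q => sR.foldl (fun σ x => stepA K σ (dchar j, dchar q, dchar x)) σ) σ).jps.getD k false = σ.jps.getD k false) := by
  intro M
  induction M with
  | nil =>
    intro _ _ σ τ _ Hjs Hps _ Hres
    exact ⟨Hjs, Hps, Hres, fun _ _ => rfl, fun _ _ => rfl⟩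
  | cons q M' ih =>
    intro hdM hMsort σ τ Hjp0 Hjs Hps Hm Hres
    have hdq : dg q := hdM q List.mem_cons_self
    have hdM' : ∀ x ∈ M', dg x := fun x hx => hdM x (List.mem_cons_of_mem _ hx)
    have hlt : ∀ x ∈ M', q < x := (List.pairwise_cons.mp hMsort).1
    rw [List.foldl_cons, List.foldl_cons]
    obtain ⟨js1, ps1, res1, fjp1, fjps1⟩ :=
      inner_sim K hj hdq sR hsR hsSort σ τ 0 (Hjp0 q List.mem_cons_self) Hjs Hps
        (Hm q List.mem_cons_self) Hres
    have Hne : ∀ q' ∈ M', dchar q' ≠ dchar q := by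
      intro q' hq' h
      have := dchar_inj (hdM' q' hq') hdq h
      have := hlt q' hq'
      omega
    have Hjp0' : ∀ q' ∈ M', ((sR.foldl (fun σ x => stepA K σ (dchar j, dchar q, dchar x)) σ) : ASt).jp.getD [dchar j, dchar q'] 0 = 0 := by
      intro q' hq'
      rw [fjp1 [dchar j, dchar q'] (by
        intro h
        injection h with h1 h2
        injection h2 with h2 h3
        exact Hne q' hq' h2)]
      exact Hjp0 q' (List.mem_cons_of_mem _ hq')
    have Hm' : ∀ q' ∈ M', ∀ x ∈ sR, ((sR.foldl (fun σ x => stepA K σ (dchar j, dchar q, dchar x)) σ) : ASt).jps.getD [dchar j, dchar q', dchar x] false = false := by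
      intro q' hq' x hx
      rw [fjps1 [dchar j, dchar q', dchar x] (by
        intro x' _ h
        injection h with h1 h2
        injection h2 with h2 h3
        exact Hne q' hq' h2)]
      exact Hm q' (List.mem_cons_of_mem _ hq') x hx
    obtain ⟨js2, ps2, res2, fjp2, fjps2⟩ :=
      ih hdM' hMsort.of_cons (sR.foldl (fun σ x => stepA K σ (dchar j, dchar q, dchar x)) σ) (innerB K j q sR 0 τ) Hjp0' js1 ps1 Hm' res1
    refine ⟨js2, ps2, res2, ?_, ?_⟩
    · intro k hk
      rw [fjp2 k (fun q' hq' => hk q' (List.mem_cons_of_mem _ hq'))]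
      exact fjp1 k (hk q List.mem_cons_self)
    · intro k hk
      rw [fjps2 k (fun q' hq' x hx => hk q' (List.mem_cons_of_mem _ hq') x hx)]
      exact fjps1 k (fun x hx => hk q List.mem_cons_self x hx)

theorem outer_sim (K : Int) (pR sR : List Int)
    (hpR : ∀ x ∈ pR, dg x) (hsR : ∀ x ∈ sR, dg x) (hsSort : sR.Pairwise (· < ·)) :
    ∀ (L : List Int), (∀ x ∈ L, dg x) → L.Pairwise (· < ·) →
    ∀ (σ : ASt) (τ : BSt),
    (∀ a ∈ L, ∀ q ∈ pR, σ.jp.getD [dchar a, dchar q] 0 = 0) →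
    (∀ a b, dg a → dg b → σ.js.getD [dchar a, dchar b] 0 = τ.js.getD (a, b) 0) →
    (∀ a b, dg a → dg b → σ.ps.getD [dchar a, dchar b] 0 = τ.ps.getD (a, b) 0) →
    (∀ a ∈ L, ∀ q ∈ pR, ∀ x ∈ sR, σ.jps.getD [dchar a, dchar q, dchar x] false = false) →
    σ.res = τ.res →
    ∀ (hpSort : pR.Pairwise (· < ·)),
    (L.foldl (fun σ a => pR.foldl (fun σ q => sR.foldl (fun σ x => stepA K σ (dchar a, dchar q, dchar x)) σ) σ) σ).res = (L.foldl (fun τ a => pR.foldl (fun τ q => innerB K a q sR 0 τ) τ) τ).res := by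
  intro L
  induction L with
  | nil => intro _ _ σ τ _ _ _ _ Hres _; exact Hres
  | cons a L' ih =>
    intro hdL hLsort σ τ Hjp0 Hjs Hps Hm Hres hpSort
    have hda : dg a := hdL a List.mem_cons_self
    have hdL' : ∀ x ∈ L', dg x := fun x hx => hdL x (List.mem_cons_of_mem _ hx)
    have hlt : ∀ x ∈ L', a < x := (List.pairwise_cons.mp hLsort).1
    rw [List.foldl_cons, List.foldl_cons]
    obtain ⟨js1, ps1, res1, fjp1, fjps1⟩ :=
      middle_sim K hda sR hsR hsSort pR hpR hpSort σ τ (Hjp0 a List.mem_cons_self) Hjs Hps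
        (Hm a List.mem_cons_self) Hres
    have Hne : ∀ a' ∈ L', dchar a' ≠ dchar a := by
      intro a' ha' h
      have := dchar_inj (hdL' a' ha') hda h
      have := hlt a' ha'
      omega
    have Hjp0' : ∀ a' ∈ L', ∀ q ∈ pR, ((pR.foldl (fun σ q => sR.foldl (fun σ x => stepA K σ (dchar a, dchar q, dchar x)) σ) σ) : ASt).jp.getD [dchar a', dchar q] 0 = 0 := by
      intro a' ha' q hq
      rw [fjp1 [dchar a', dchar q] (by
        intro q' _ h
        injection h with h1 h2
        exact Hne a' ha' h1)]
      exact Hjp0 a' (List.mem_cons_of_mem _ ha') q hq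
    have Hm' : ∀ a' ∈ L', ∀ q ∈ pR, ∀ x ∈ sR,
        ((pR.foldl (fun σ q => sR.foldl (fun σ x => stepA K σ (dchar a, dchar q, dchar x)) σ) σ) : ASt).jps.getD [dchar a', dchar q, dchar x] false = false := by
      intro a' ha' q hq x hx
      rw [fjps1 [dchar a', dchar q, dchar x] (by
        intro q' _ x' _ h
        injection h with h1 h2
        exact Hne a' ha' h1)]
      exact Hm a' (List.mem_cons_of_mem _ ha') q hq x hx
    exact ih hdL' hLsort.of_cons (pR.foldl (fun σ q => sR.foldl (fun σ x => stepA K σ (dchar a, dchar q, dchar x)) σ) σ) (pR.foldl (fun τ q => innerB K a q sR 0 τ) τ) Hjp0' js1 ps1 Hm' res1 hpSort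

theorem solve_res (J P S K : Int) :
    solve J P S K = (passA K (triplesA J P S) { solveInitA J P S with added := false }).res := by
  have hinv := init_invZ J P S
  unfold solve
  rw [show (J.toNat * P.toNat * S.toNat + 2) = (J.toNat * P.toNat * S.toNat + 1) + 1 from rfl]
  rw [loopA, if_pos hinv.2.2.2.2.2]
  exact loop_res _ _ (pass_saturates _ _)

theorem innerB_K0 {K j p : Int} (hK : K ≤ 0) :
    ∀ (l : List Int) (τ : BSt), innerB K j p l 0 τ = τ
  | [], _ => rfl
  | _ :: _, τ => by rw [innerB, if_pos (by omega)]

theorem dg_of_mem_pyRange {m : Int} (hm : m ≤ 10) :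
    ∀ x ∈ PySem.List.pyRange 0 m 1, dg x := by
  intro x hx
  have := (PySem.List.mem_pyRange_one).mp hx
  exact ⟨this.1, by omega⟩

theorem solve_alt_res_nil {J P S K : Int}
    (h : K ≤ 0 ∨ min J 10 ≤ 0 ∨ min P 10 ≤ 0 ∨ min S 10 ≤ 0) :
    solve_alt J P S K = [] := by
  unfold solve_alt
  rcases h with hK | hJ | hP | hS
  · simp only [innerB_K0 hK, PySem.List.foldl_ignore]
  · rw [pyRange_nil hJ]; rfl
  · rw [pyRange_nil hP]
    simp only [List.foldl_nil, PySem.List.foldl_ignore]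
  · rw [pyRange_nil hS]
    simp only [innerB, PySem.List.foldl_ignore]

theorem pass_res_nil {J P S K : Int} (σ : ASt) (hres : σ.res = [])
    (h : PySem.List.slice pvDigits none (some J) = [] ∨
         PySem.List.slice pvDigits none (some P) = [] ∨
         PySem.List.slice pvDigits none (some S) = []) :
    (passA K (triplesA J P S) σ).res = [] := by
  have hT : triplesA J P S = [] := by
    unfold triplesA
    rcases h with h | h | h <;> rw [h] <;> simp
  rw [hT]
  exact hres

theorem solve_eq_alt (J P S K : Int) (hpre : Pre_solve J P S K) :
    solve J P S K = solve_alt J P S K := by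
  unfold Pre_solve at hpre
  have hz := init_invZ J P S
  rw [solve_res]
  by_cases hK : K ≤ 0
  · -- K ≤ 0: nothing is ever scheduled on either side
    rw [show passA K (triplesA J P S) ({ solveInitA J P S with added := false } : ASt)
        = ({ solveInitA J P S with added := false } : ASt) from
      pass_noop _ _ (fun t _ hok => absurd hok.1 (by rw [hz.1]; omega))]
    rw [show ({ solveInitA J P S with added := false } : ASt).res = [] from hz.2.2.2.2.1]
    rw [solve_alt_res_nil (Or.inl hK)]
  · by_cases hJ : pvNE J
    · by_cases hP : pvNE P
      · by_cases hS : pvNE S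
        · -- the main case: J, P, S ≥ 1
          have hbad : ¬ (J < 0 ∨ P < 0 ∨ (S < 0 ∧ 1 ≤ K)) := fun hb => hpre ⟨hJ, hP, hS, hb⟩
          unfold pvNE at hJ hP hS
          have hJ1 : 1 ≤ J := by omega
          have hP1 : 1 ≤ P := by omega
          have hS1 : 1 ≤ S := by omega
          unfold passA triplesA
          rw [show PySem.List.slice pvDigits none (some J)
              = (PySem.List.pyRange 0 (min J 10) 1).map dchar from csOf_eq hJ1,
            show PySem.List.slice pvDigits none (some P)
              = (PySem.List.pyRange 0 (min P 10) 1).map dchar from csOf_eq hP1,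
            show PySem.List.slice pvDigits none (some S)
              = (PySem.List.pyRange 0 (min S 10) 1).map dchar from csOf_eq hS1]
          simp only [List.foldl_flatMap, List.foldl_map]
          unfold solve_alt
          apply outer_sim K _ _ (dg_of_mem_pyRange (by omega)) (dg_of_mem_pyRange (by omega))
              (PySem.List.pairwise_lt_pyRange_one 0 (min S 10)) _ (dg_of_mem_pyRange (by omega))
              (PySem.List.pairwise_lt_pyRange_one 0 (min J 10))
          · exact fun a _ q _ => hz.1 _
          · exact fun a b _ _ => by rw [hz.2.1, PySem.Dict.getD_empty]
          · exact fun a b _ _ => by rw [hz.2.2.1, PySem.Dict.getD_empty]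
          · exact fun a _ q _ x _ => hz.2.2.2.1 _
          · exact hz.2.2.2.2.1
          · exact PySem.List.pairwise_lt_pyRange_one 0 (min P 10)
        · rw [pass_res_nil ({ solveInitA J P S with added := false } : ASt)
            (show ({ solveInitA J P S with added := false } : ASt).res = [] from hz.2.2.2.2.1) (Or.inr (Or.inr (csOf_nil hS))),
            solve_alt_res_nil (by unfold pvNE at hS; right; right; right; omega)]
      · rw [pass_res_nil ({ solveInitA J P S with added := false } : ASt)
            (show ({ solveInitA J P S with added := false } : ASt).res = [] from hz.2.2.2.2.1) (Or.inr (Or.inl (csOf_nil hP))),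
          solve_alt_res_nil (by unfold pvNE at hP; right; right; left; omega)]
    · rw [pass_res_nil ({ solveInitA J P S with added := false } : ASt)
            (show ({ solveInitA J P S with added := false } : ASt).res = [] from hz.2.2.2.2.1) (Or.inl (csOf_nil hJ)),
        solve_alt_res_nil (by unfold pvNE at hJ; right; left; omega)]

-- ===== VERDICT (by name: the statement is the Claim_ definition above) =====
theorem solve_spec : Claim_equal_solve := by
  unfold Claim_equal_solve Spec_solve
  intro J P S K _ hpre
  exact solve_eq_alt J P S K hpre

@[simp] theorem solve_raises : Claim_raises_solve := by
  unfold Claim_raises_solve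
  exact ⟨fun J P S K _ h hp => hp h, by decide⟩
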